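-- pv_equiv track=rewrite | github.com/ouvir/Algorithm | 프로그래머스/3/42579. 베스트앨범/베스트앨범.py | solution
-- ===== SOURCE A (Python) =====
-- def solution(genres, plays):
--     dict1 = dict()
--     dict2 = dict()
--
--     for i in range(len(genres)):
--         # dict1 업데이트
--         if genres[i] in dict1:
--             dict1[genres[i]] += plays[i]
--         else:
--             dict1[genres[i]] = plays[i]
--
--         # dict2 업데이트
--         if genres[i] in dict2:
--             # 비교
--             dict2[genres[i]].append((plays[i],i))
--             dict2[genres[i]].sort(key= lambda x:x[0], reverse=True)
--             while len(dict2[genres[i]]) > 2: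
--                 dict2[genres[i]].pop()
--         else:
--             # 추가
--             dict2[genres[i]] = []
--             dict2[genres[i]].append((plays[i],i))
--
--     items = list(dict1.items())
--     items.sort(key=lambda x: x[1], reverse=True)
--
--     answer = []
--
--     for key, value in items:
--         for item in dict2[key]:
--             answer.append(item[1])
--
--     return answer
-- ===== SOURCE B (Python) =====
-- def solution(genres, plays):
--     totals = {}
--     tracks = {}
--     for i, g in enumerate(genres):
--         totals[g] = totals.get(g, 0) + plays[i]
--         tracks.setdefault(g, []).append((plays[i], i))
--     answer = []
--     for g in sorted(totals, key=totals.get, reverse=True):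
--         for p, i in sorted(tracks[g], key=lambda t: t[0], reverse=True)[:2]:
--             answer.append(i)
--     return answer
-- ===== Notes on version B (the rewrite author's own statement) =====
-- stated objective: simpler
-- what changed: B drops A's in-loop top-2 maintenance (append, re-sort, pop inside the scan): it builds the full per-genre track lists and totals in one plain pass, then sorts each genre's list once at the end and takes the first two.
import Mathlib
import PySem

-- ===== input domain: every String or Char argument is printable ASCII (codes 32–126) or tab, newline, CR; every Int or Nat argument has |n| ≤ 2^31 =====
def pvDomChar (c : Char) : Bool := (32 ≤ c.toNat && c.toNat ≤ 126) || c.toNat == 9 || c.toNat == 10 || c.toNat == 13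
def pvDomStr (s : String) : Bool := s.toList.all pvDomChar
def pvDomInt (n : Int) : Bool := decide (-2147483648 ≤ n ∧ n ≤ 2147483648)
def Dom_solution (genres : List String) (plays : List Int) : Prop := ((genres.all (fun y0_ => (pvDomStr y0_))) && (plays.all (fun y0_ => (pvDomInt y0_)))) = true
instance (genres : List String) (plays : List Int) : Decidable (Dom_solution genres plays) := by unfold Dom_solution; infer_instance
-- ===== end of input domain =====

-- B replaces A's in-loop top-2 maintenance (append + re-sort + pop at every step) by one plain
-- grouping pass followed by a single sort-and-take-2 per genre at the end (objective: simpler).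

-- ===== PORT A =====
-- helper for A's 'while len(dict2[g]) > 2: dict2[g].pop()'
def pvPopWhileGt2 (l : List (Int × Int)) : List (Int × Int) :=
  if h : l.length > 2 then pvPopWhileGt2 l.dropLast else l
termination_by l.length
decreasing_by simp [List.length_dropLast]; omega

def solution (genres : List String) (plays : List Int) : List Int :=
  let st := (PySem.List.pyRange 0 (PySem.List.len genres) 1).foldl
    (fun (st : PySem.Dict String Int × PySem.Dict String (List (Int × Int))) i =>
      let g := PySem.List.pyGetD genres i ""
      let p := PySem.List.pyGetD plays i 0
      let d1 := if st.1.contains g then st.1.insert g (st.1.getD g 0 + p) else st.1.insert g p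
      let d2 := if st.2.contains g then
          st.2.insert g (pvPopWhileGt2
            (PySem.List.sorted (st.2.getD g [] ++ [(p, i)]) (fun t => t.1) true))
        else st.2.insert g [(p, i)]
      (d1, d2))
    (PySem.Dict.empty, PySem.Dict.empty)
  let items := PySem.List.sorted st.1.items (fun kv => kv.2) true
  items.foldl (fun ans kv => (st.2.getD kv.1 []).foldl (fun a it => a ++ [it.2]) ans) []

-- ===== PORT B =====
def solution_alt (genres : List String) (plays : List Int) : List Int :=
  let st := (PySem.List.enumerate genres 0).foldl
    (fun (st : PySem.Dict String Int × PySem.Dict String (List (Int × Int))) ig =>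
      let p := PySem.List.pyGetD plays ig.1 0
      (st.1.insert ig.2 (st.1.getD ig.2 0 + p),
       st.2.modify ig.2 [] (· ++ [(p, ig.1)])))
    (PySem.Dict.empty, PySem.Dict.empty)
  (PySem.List.sorted st.1.keys (fun k => st.1.getD k 0) true).foldl
    (fun ans g =>
      ((PySem.List.sorted (st.2.getD g []) (fun t => t.1) true).take 2).foldl
        (fun a t => a ++ [t.2]) ans) []

-- ===== PRECONDITION & SPEC =====
-- Pre_ excludes exactly the inputs on which A raises IndexError: plays shorter than genres.
def Pre_solution (genres : List String) (plays : List Int) : Prop := genres.length ≤ plays.length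
instance (genres : List String) (plays : List Int) : Decidable (Pre_solution genres plays) := by unfold Pre_solution; infer_instance
def pvWitness_solution : List String × List Int := (["a", "b", "a"], [5, 7, 5])

def Spec_solution (genres : List String) (plays : List Int) (out : List Int) : Prop := out = solution_alt genres plays
instance (genres : List String) (plays : List Int) (out : List Int) : Decidable (Spec_solution genres plays out) := by unfold Spec_solution; infer_instance

-- ===== CLAIM (what is proved, stated in full; the proofs are below) =====
def Claim_equal_solution : Prop := ∀ (genres : List String) (plays : List Int), Dom_solution genres plays → Pre_solution genres plays → Spec_solution genres plays (solution genres plays)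

-- ===== LEMMAS AND PROOFS =====

-- the top-2 of a genre's track list, as B computes it
def pvTop2 (l : List (Int × Int)) : List (Int × Int) :=
  (PySem.List.sorted l (fun t => t.1) true).take 2

-- the index list both loops run over, and named step functions for the four dict updates
def pvIdx (genres : List String) : List Int := PySem.List.pyRange 0 (PySem.List.len genres) 1
def pvG (genres : List String) (i : Int) : String := PySem.List.pyGetD genres i ""
def pvP (plays : List Int) (i : Int) : Int := PySem.List.pyGetD plays i 0

def pvF1 (genres : List String) (plays : List Int) (d : PySem.Dict String Int) (i : Int) : PySem.Dict String Int :=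
  if d.contains (pvG genres i) then d.insert (pvG genres i) (d.getD (pvG genres i) 0 + pvP plays i)
  else d.insert (pvG genres i) (pvP plays i)

def pvF1' (genres : List String) (plays : List Int) (d : PySem.Dict String Int) (i : Int) : PySem.Dict String Int :=
  d.insert (pvG genres i) (d.getD (pvG genres i) 0 + pvP plays i)

def pvF2A (genres : List String) (plays : List Int) (d : PySem.Dict String (List (Int × Int))) (i : Int) : PySem.Dict String (List (Int × Int)) :=
  if d.contains (pvG genres i) then
    d.insert (pvG genres i) (pvPopWhileGt2
      (PySem.List.sorted (d.getD (pvG genres i) [] ++ [(pvP plays i, i)]) (fun t => t.1) true))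
  else d.insert (pvG genres i) [(pvP plays i, i)]

def pvF2B (genres : List String) (plays : List Int) (d : PySem.Dict String (List (Int × Int))) (i : Int) : PySem.Dict String (List (Int × Int)) :=
  d.insert (pvG genres i) (d.getD (pvG genres i) [] ++ [(pvP plays i, i)])

-- a fold whose two state components evolve independently splits into two folds
theorem pvFoldPair {ι α β : Type} (l : List ι) (f : α → ι → α) (g : β → ι → β) (a : α) (b : β) :
    l.foldl (fun s i => (f s.1 i, g s.2 i)) (a, b) = (l.foldl f a, l.foldl g b) := by
  induction l generalizing a b with
  | nil => rfl
  | cons x t ih => simpa using ih (f a x) (g b x)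

theorem pvLengthInsertBy {α : Type} (b : α → α → Bool) (x : α) (s : List α) :
    (PySem.List.insertBy b x s).length = s.length + 1 := by
  induction s with
  | nil => rfl
  | cons y t ih => simp only [PySem.List.insertBy]; split <;> simp [ih]

theorem pvTakeInsertBy {α : Type} (n : Nat) (b : α → α → Bool) (x : α) (s : List α) :
    (PySem.List.insertBy b x s).take n = (PySem.List.insertBy b x (s.take n)).take n := by
  induction s generalizing n with
  | nil => simp
  | cons y t ih =>
    cases n with
    | zero => simp
    | succ m =>
      simp only [List.take_succ_cons, PySem.List.insertBy]
      split
      · simp only [List.take_succ_cons, List.cons.injEq, true_and]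
        cases m with
        | zero => simp
        | succ k =>
          simp only [List.take_succ_cons, List.take_take, List.cons.injEq, true_and]
          congr 1
          omega
      · simp only [List.take_succ_cons, List.cons.injEq, true_and]
        exact ih m

theorem pvPopWhileGt2_eq_take (l : List (Int × Int)) (h : l.length ≤ 3) :
    pvPopWhileGt2 l = l.take 2 := by
  unfold pvPopWhileGt2
  split
  · next h2 =>
    have h3 : l.length = 3 := by omega
    unfold pvPopWhileGt2
    rw [dif_neg (by simp [List.length_dropLast]; omega)]
    rw [List.dropLast_eq_take, h3]
  · next h2 =>
    rw [List.take_of_length_le (by omega)]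

theorem pvSortedRevAppend {α κ : Type} [LinearOrder κ] (l : List α) (x : α) (key : α → κ) :
    PySem.List.sorted (l ++ [x]) key true
      = PySem.List.insertBy (fun a b => decide (key b < key a)) x (PySem.List.sorted l key true) := by
  rw [PySem.List.sorted_rev_eq_foldl_insertBy, PySem.List.sorted_rev_eq_foldl_insertBy, List.foldl_append]
  rfl

theorem pvStepValue (l : List (Int × Int)) (x : Int × Int) :
    pvPopWhileGt2 (PySem.List.sorted (pvTop2 l ++ [x]) (fun t => t.1) true) = pvTop2 (l ++ [x]) := by
  have hp : (pvTop2 l).Pairwise (fun a b => b.1 ≤ a.1) :=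
    List.Pairwise.sublist (List.take_sublist 2 _) (PySem.List.sorted_pairwise_rev l (fun t => t.1))
  have hlen : (pvTop2 l).length ≤ 2 := by
    simpa [pvTop2] using List.length_take_le 2 (PySem.List.sorted l (fun t => t.1) true)
  rw [pvSortedRevAppend, PySem.List.sorted_rev_eq_self_of_pairwise _ _ hp]
  rw [pvPopWhileGt2_eq_take _ (by rw [pvLengthInsertBy]; omega)]
  show _ = (PySem.List.sorted (l ++ [x]) (fun t => t.1) true).take 2
  rw [pvSortedRevAppend]
  rw [pvTakeInsertBy 2 _ x (PySem.List.sorted l (fun t => t.1) true)]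
  rfl

theorem pvInsertByMap {α β κ : Type} [LinearOrder κ] (f : α → β) (key : β → κ) (x : α) (zs : List α) :
    PySem.List.insertBy (fun a b => decide (key b < key a)) (f x) (zs.map f)
      = (PySem.List.insertBy (fun a b => decide (key (f b) < key (f a))) x zs).map f := by
  induction zs with
  | nil => rfl
  | cons y t ih =>
    simp only [List.map_cons, PySem.List.insertBy]
    split <;> simp_all

theorem pvSortedRevMap {α β κ : Type} [LinearOrder κ] (f : α → β) (key : β → κ) (xs : List α) :
    PySem.List.sorted (xs.map f) key true
      = (PySem.List.sorted xs (fun a => key (f a)) true).map f := by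
  rw [PySem.List.sorted_rev_eq_foldl_insertBy, PySem.List.sorted_rev_eq_foldl_insertBy]
  have aux : ∀ (xs zs : List α),
      (xs.map f).foldl (fun acc x => PySem.List.insertBy (fun a b => decide (key b < key a)) x acc) (zs.map f)
        = (xs.foldl (fun acc x => PySem.List.insertBy (fun a b => decide (key (f b) < key (f a))) x acc) zs).map f := by
    intro xs
    induction xs with
    | nil => intro zs; rfl
    | cons x t ih =>
      intro zs
      simp only [List.map_cons, List.foldl_cons]
      rw [pvInsertByMap]
      exact ih _
  simpa using aux xs []

theorem pvDict1Eq (genres : List String) (plays : List Int) (idx : List Int) :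
    idx.foldl (pvF1 genres plays) PySem.Dict.empty = idx.foldl (pvF1' genres plays) PySem.Dict.empty := by
  apply PySem.List.foldl_congr_mem
  intro d i _
  unfold pvF1 pvF1'
  by_cases h : d.contains (pvG genres i)
  · rw [if_pos h]
  · rw [if_neg h, PySem.Dict.getD_of_not_contains _ _ (by simpa using h), zero_add]

theorem pvInv (genres : List String) (plays : List Int) (idx : List Int) :
    (idx.foldl (pvF2A genres plays) PySem.Dict.empty).items
        = (idx.foldl (pvF2B genres plays) PySem.Dict.empty).items.map (fun kv => (kv.1, pvTop2 kv.2))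
      ∧ (idx.foldl (pvF2B genres plays) PySem.Dict.empty).keys.Nodup := by
  induction idx using List.reverseRecOn with
  | nil => exact ⟨rfl, List.nodup_nil⟩
  | append_singleton t i ih =>
    obtain ⟨hitems, hnd⟩ := ih
    set dA := t.foldl (pvF2A genres plays) PySem.Dict.empty with hdA
    set dB := t.foldl (pvF2B genres plays) PySem.Dict.empty with hdB
    have hkeys : dA.keys = dB.keys := by
      show dA.items.map Prod.fst = dB.items.map Prod.fst
      rw [hitems, List.map_map]
      rfl
    have hndA : dA.keys.Nodup := hkeys ▸ hnd
    have hcont : dA.contains (pvG genres i) = dB.contains (pvG genres i) := by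
      rw [PySem.Dict.contains_eq_decide_mem_keys, PySem.Dict.contains_eq_decide_mem_keys, hkeys]
    simp only [List.foldl_append, List.foldl_cons, List.foldl_nil, ← hdA, ← hdB]
    by_cases hc : dB.contains (pvG genres i) = true
    · -- existing genre
      have hsome : (dB.get? (pvG genres i)).isSome := by rw [← PySem.Dict.contains_eq_isSome_get?]; exact hc
      obtain ⟨l, hl⟩ := Option.isSome_iff_exists.mp hsome
      have hBgetD : dB.getD (pvG genres i) [] = l := PySem.Dict.getD_of_get?_eq_some _ _ hl
      have hmemB : (pvG genres i, l) ∈ dB.items := PySem.Dict.mem_items_of_get?_eq_some _ hl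
      have hmemA : (pvG genres i, pvTop2 l) ∈ dA.items := by
        rw [hitems]; exact List.mem_map_of_mem hmemB
      have hAgetD : dA.getD (pvG genres i) [] = pvTop2 l := PySem.Dict.getD_of_mem_items _ hmemA hndA _
      constructor
      · show (pvF2A genres plays dA i).items = (pvF2B genres plays dB i).items.map _
        unfold pvF2A pvF2B
        rw [if_pos (by rw [hcont]; exact hc)]
        rw [hAgetD, hBgetD, pvStepValue]
        rw [PySem.Dict.items_insert, PySem.Dict.items_insert, if_pos hc, if_pos (by rw [hcont]; exact hc)]
        rw [hitems, List.map_map, List.map_map]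
        apply List.map_congr_left
        intro kv _
        by_cases hkv : kv.1 = pvG genres i
        · simp [hkv]
        · simp [hkv]
      · show (pvF2B genres plays dB i).keys.Nodup
        unfold pvF2B
        rw [PySem.Dict.keys_insert_of_contains _ _ hc]
        exact hnd
    · -- new genre
      have hc' : dB.contains (pvG genres i) = false := by simpa using hc
      have hcA : dA.contains (pvG genres i) = false := by rw [hcont]; exact hc'
      have hBgetD : dB.getD (pvG genres i) [] = [] := PySem.Dict.getD_of_not_contains _ _ hc'
      have hcA' : ¬ dA.contains (pvG genres i) = true := by simp [hcA]
      have hcB' : ¬ dB.contains (pvG genres i) = true := hc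
      constructor
      · show (pvF2A genres plays dA i).items = (pvF2B genres plays dB i).items.map _
        unfold pvF2A pvF2B
        rw [if_neg hcA']
        rw [hBgetD]
        rw [PySem.Dict.items_insert, PySem.Dict.items_insert, if_neg hcA', if_neg hcB']
        rw [List.map_append, hitems]
        rfl
      · show (pvF2B genres plays dB i).keys.Nodup
        unfold pvF2B
        rw [PySem.Dict.keys_insert_of_not_contains _ _ hc']
        have hgnot : pvG genres i ∉ dB.keys := by
          rw [PySem.Dict.contains_eq_decide_mem_keys] at hc'
          simpa using hc'
        rw [List.nodup_append]
        refine ⟨hnd, List.nodup_singleton _, ?_⟩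
        intro a ha b hb h
        exact hgnot ((h.trans (List.mem_singleton.mp hb)) ▸ ha)

theorem pvGetDEq (genres : List String) (plays : List Int) (idx : List Int) (k : String) :
    (idx.foldl (pvF2A genres plays) PySem.Dict.empty).getD k []
      = pvTop2 ((idx.foldl (pvF2B genres plays) PySem.Dict.empty).getD k []) := by
  obtain ⟨hitems, hnd⟩ := pvInv genres plays idx
  set dA := idx.foldl (pvF2A genres plays) PySem.Dict.empty
  set dB := idx.foldl (pvF2B genres plays) PySem.Dict.empty
  have hndA : dA.keys.Nodup := by
    have : dA.keys = dB.keys := by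
      show dA.items.map Prod.fst = dB.items.map Prod.fst
      rw [hitems, List.map_map]; rfl
    rw [this]; exact hnd
  by_cases hc : dB.contains k = true
  · have hsome : (dB.get? k).isSome := by rw [← PySem.Dict.contains_eq_isSome_get?]; exact hc
    obtain ⟨l, hl⟩ := Option.isSome_iff_exists.mp hsome
    rw [PySem.Dict.getD_of_get?_eq_some _ _ hl]
    have hmemA : (k, pvTop2 l) ∈ dA.items := by
      rw [hitems]; exact List.mem_map_of_mem (PySem.Dict.mem_items_of_get?_eq_some _ hl)
    exact PySem.Dict.getD_of_mem_items _ hmemA hndA _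
  · have hc' : dB.contains k = false := by simpa using hc
    have hcA : dA.contains k = false := by
      rw [PySem.Dict.contains_eq_decide_mem_keys] at hc' ⊢
      have : dA.keys = dB.keys := by
        show dA.items.map Prod.fst = dB.items.map Prod.fst
        rw [hitems, List.map_map]; rfl
      rw [this]; exact hc'
    rw [PySem.Dict.getD_of_not_contains _ _ hc', PySem.Dict.getD_of_not_contains _ _ hcA]
    rfl

theorem pvSolEqA (genres : List String) (plays : List Int) :
    solution genres plays
      = (PySem.List.sorted ((pvIdx genres).foldl (pvF1 genres plays) PySem.Dict.empty).items (fun kv => kv.2) true).foldl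
          (fun ans kv => (((pvIdx genres).foldl (pvF2A genres plays) PySem.Dict.empty).getD kv.1 []).foldl
            (fun a it => a ++ [it.2]) ans) [] := by
  exact congrArg
    (fun st : PySem.Dict String Int × PySem.Dict String (List (Int × Int)) =>
      (PySem.List.sorted st.1.items (fun kv => kv.2) true).foldl
        (fun ans kv => (st.2.getD kv.1 []).foldl (fun a it => a ++ [it.2]) ans) [])
    (pvFoldPair (pvIdx genres) (pvF1 genres plays) (pvF2A genres plays) PySem.Dict.empty PySem.Dict.empty)

theorem pvSolEqB (genres : List String) (plays : List Int) :
    solution_alt genres plays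
      = (PySem.List.sorted ((pvIdx genres).foldl (pvF1' genres plays) PySem.Dict.empty).keys
            (fun k => ((pvIdx genres).foldl (pvF1' genres plays) PySem.Dict.empty).getD k 0) true).foldl
          (fun ans g =>
            ((PySem.List.sorted (((pvIdx genres).foldl (pvF2B genres plays) PySem.Dict.empty).getD g []) (fun t => t.1) true).take 2).foldl
              (fun a t => a ++ [t.2]) ans) [] := by
  have h2 : (PySem.List.enumerate genres 0).foldl
      (fun (st : PySem.Dict String Int × PySem.Dict String (List (Int × Int))) ig =>
        (st.1.insert ig.2 (st.1.getD ig.2 0 + PySem.List.pyGetD plays ig.1 0),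
         st.2.modify ig.2 [] (· ++ [(PySem.List.pyGetD plays ig.1 0, ig.1)])))
      (PySem.Dict.empty, PySem.Dict.empty)
      = ((pvIdx genres).foldl (pvF1' genres plays) PySem.Dict.empty,
         (pvIdx genres).foldl (pvF2B genres plays) PySem.Dict.empty) := by
    rw [PySem.List.enumerate_eq_map_pyRange genres "", List.foldl_map]
    exact pvFoldPair (pvIdx genres) (pvF1' genres plays) (pvF2B genres plays) PySem.Dict.empty PySem.Dict.empty
  exact congrArg
    (fun st : PySem.Dict String Int × PySem.Dict String (List (Int × Int)) =>
      (PySem.List.sorted st.1.keys (fun k => st.1.getD k 0) true).foldl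
        (fun ans g =>
          ((PySem.List.sorted (st.2.getD g []) (fun t => t.1) true).take 2).foldl
            (fun a t => a ++ [t.2]) ans) [])
    h2

-- ===== VERDICT (by name: the statement is the Claim_ definition above) =====
theorem solution_spec : Claim_equal_solution := by
  intro genres plays _ _
  show solution genres plays = solution_alt genres plays
  rw [pvSolEqA, pvSolEqB, pvDict1Eq]
  set T := (pvIdx genres).foldl (pvF1' genres plays) PySem.Dict.empty with hT
  have hndT : T.keys.Nodup :=
    PySem.Dict.nodup_keys_foldl_insert_key (pvIdx genres) (pvG genres)
      (fun d i => d.getD (pvG genres i) 0 + pvP plays i) PySem.Dict.empty PySem.Dict.nodup_keys_empty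
  rw [PySem.Dict.items_eq_map_keys T hndT 0]
  rw [pvSortedRevMap (fun k => (k, T.getD k 0)) (fun kv => kv.2) T.keys]
  rw [List.foldl_map]
  have hkey : (fun a : String => ((a, T.getD a 0) : String × Int).2) = (fun k => T.getD k 0) := rfl
  rw [hkey]
  apply PySem.List.foldl_congr_mem
  intro acc k _
  show (((pvIdx genres).foldl (pvF2A genres plays) PySem.Dict.empty).getD k []).foldl
      (fun a it => a ++ [it.2]) acc = _
  rw [pvGetDEq]
  rfl
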